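-- pv_equiv track=rewrite | github.com/Burbon13/Leetcode-problems | src/leetcode/circular_permutation.py | differOnlyByOneBit
-- ===== SOURCE A (Python) =====
-- def differOnlyByOneBit(nr1, nr2, n) -> bool:
--     bit = 1
--     differences = 0
--     for _ in range(n):
--         if nr1 & bit != nr2 & bit:
--             differences += 1
--             if differences > 1:
--                 return False
--         bit <<= 1
--     return True
-- ===== SOURCE B (Python) =====
-- def differOnlyByOneBit(nr1, nr2, n) -> bool:
--     if n <= 0:
--         return True
--     d = (nr1 ^ nr2) & ((1 << n) - 1)
--     return d & (d - 1) == 0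
-- ===== Notes on version B (the rewrite author's own statement) =====
-- stated objective: faster
-- what changed: Replaced A's per-bit loop (n iterations, each with a shift and two masked comparisons on growing bignums) by a closed-form bit trick: mask the XOR of the two numbers to the low n bits and test 'at most one set bit' via d & (d-1) == 0, with no loop at all.
import Mathlib
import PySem

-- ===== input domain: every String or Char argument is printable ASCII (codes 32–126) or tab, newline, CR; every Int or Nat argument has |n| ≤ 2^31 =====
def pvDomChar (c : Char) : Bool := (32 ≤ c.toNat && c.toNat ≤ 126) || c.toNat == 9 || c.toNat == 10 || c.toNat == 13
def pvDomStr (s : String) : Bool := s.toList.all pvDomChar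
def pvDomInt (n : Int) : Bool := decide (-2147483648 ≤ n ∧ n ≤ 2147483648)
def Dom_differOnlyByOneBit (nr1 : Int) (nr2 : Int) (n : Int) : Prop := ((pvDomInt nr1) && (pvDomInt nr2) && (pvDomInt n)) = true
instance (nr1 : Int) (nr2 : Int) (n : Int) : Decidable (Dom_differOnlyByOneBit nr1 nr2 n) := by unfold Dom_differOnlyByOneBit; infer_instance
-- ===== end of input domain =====

-- B replaces A's bit-by-bit loop with the closed-form test `(nr1^nr2) & ((1<<n)-1)` having at
-- most one set bit via `d & (d-1) == 0`; objective: faster (no Python-level loop over n bits).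

-- ===== PORT A =====
-- A's `for _ in range(n)` loop with state (bit, differences) and early `return False`.
-- Python's `&` / `<<` on int are two's-complement `Int.land` / `<<<` exactly.
def pvLoopA (nr1 nr2 : Int) : Nat → Int → Int → Bool
  | 0, _bit, _diffs => true
  | k+1, bit, diffs =>
    if Int.land nr1 bit ≠ Int.land nr2 bit then
      if diffs + 1 > 1 then false
      else pvLoopA nr1 nr2 k (bit <<< (1 : Int)) (diffs + 1)
    else pvLoopA nr1 nr2 k (bit <<< (1 : Int)) diffs

def differOnlyByOneBit (nr1 : Int) (nr2 : Int) (n : Int) : Bool :=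
  pvLoopA nr1 nr2 n.toNat 1 0

-- ===== PORT B =====
-- Python's `^` / `&` / `<<` on int are two's-complement `Int.xor` / `Int.land` / `<<<` exactly.
def differOnlyByOneBit_alt (nr1 : Int) (nr2 : Int) (n : Int) : Bool :=
  if n ≤ 0 then true
  else
    let d := Int.land (Int.xor nr1 nr2) ((1 : Int) <<< n - 1)
    decide (Int.land d (d - 1) = 0)

-- ===== PRECONDITION & SPEC =====
def Spec_differOnlyByOneBit (nr1 : Int) (nr2 : Int) (n : Int) (out : Bool) : Prop := out = differOnlyByOneBit_alt nr1 nr2 n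
instance (nr1 : Int) (nr2 : Int) (n : Int) (out : Bool) : Decidable (Spec_differOnlyByOneBit nr1 nr2 n out) := by unfold Spec_differOnlyByOneBit; infer_instance

-- ===== CLAIM (what is proved, stated in full; the proofs are below) =====
def Claim_equal_differOnlyByOneBit : Prop := ∀ (nr1 : Int) (nr2 : Int) (n : Int), Dom_differOnlyByOneBit nr1 nr2 n → Spec_differOnlyByOneBit nr1 nr2 n (differOnlyByOneBit nr1 nr2 n)

-- ===== LEMMAS AND PROOFS =====

theorem pv_land_ofNat (a b : Nat) : Int.land (Int.ofNat a) (Int.ofNat b) = Int.ofNat (a &&& b) := rfl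

theorem pv_land_negSucc (a b : Nat) : Int.land (Int.negSucc a) (Int.ofNat b) = Int.ofNat (Nat.ldiff b a) := rfl

theorem pv_land_ofNat_negSucc (a b : Nat) : Int.land (Int.ofNat a) (Int.negSucc b) = Int.ofNat (Nat.ldiff a b) := rfl

theorem pv_testBit_ofNat (a k : Nat) : Int.testBit (Int.ofNat a) k = a.testBit k := rfl

theorem pv_testBit_negSucc (a k : Nat) : Int.testBit (Int.negSucc a) k = !a.testBit k := rfl

theorem pv_bxor_iff (a b : Bool) : ((a ^^ b) = true) ↔ a ≠ b := by
  cases a <;> cases b <;> decide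

-- `X &&& Y = 0` means no common set bit.
theorem pv_and_eq_zero_iff (X Y : Nat) :
    X &&& Y = 0 ↔ ∀ i, ¬(X.testBit i = true ∧ Y.testBit i = true) := by
  constructor
  · intro h i hi
    have h2 := congrArg (fun t => t.testBit i) h
    simp only [Nat.testBit_and, Nat.zero_testBit] at h2
    rw [hi.1, hi.2] at h2
    simp at h2
  · intro h
    apply Nat.eq_of_testBit_eq
    intro i
    rw [Nat.testBit_and, Nat.zero_testBit]
    cases hx : X.testBit i with
    | false => simp
    | true =>
      cases hy : Y.testBit i with
      | false => simp
      | true => exact absurd ⟨hx, hy⟩ (h i)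

theorem pv_two_pow_lt (k : Nat) : (2:Nat)^k < 2^(k+1) := by
  have h1 : (2:Nat)^(k+1) = 2^k * 2 := pow_succ 2 k
  have h2 : 1 ≤ (2:Nat)^k := Nat.one_le_two_pow
  omega

-- helper for the hard direction: two distinct set bits contradict X &&& (X-1) = 0
theorem pv_onebit_aux (X i j : Nat) (h : X &&& (X - 1) = 0)
    (hi : X.testBit i = true) (hj : X.testBit j = true) (hij : i < j) : False := by
  have hex : ∃ k, X.testBit k = true := ⟨i, hi⟩
  obtain ⟨k, hk, hmin, hki⟩ : ∃ k, X.testBit k = true ∧ (∀ t, t < k → X.testBit t = false) ∧ k ≤ i :=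
    ⟨Nat.find hex, Nat.find_spec hex,
      fun t ht => Bool.eq_false_iff.mpr (Nat.find_min hex ht), Nat.find_min' hex hi⟩
  have hkj : k < j := lt_of_le_of_lt hki hij
  have hXab : X = 2^(k+1) * (X / 2^(k+1)) + X % 2^(k+1) := (Nat.div_add_mod X (2^(k+1))).symm
  set a := X / 2^(k+1) with hadef
  set b := X % 2^(k+1) with hbdef
  have hb : b = 2^k := by
    apply Nat.eq_of_testBit_eq
    intro t
    rw [hbdef, Nat.testBit_mod_two_pow, Nat.testBit_two_pow]
    rcases Nat.lt_trichotomy t k with ht | ht | ht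
    · rw [hmin t ht, Bool.and_false, (decide_eq_false (by omega : ¬(k = t))).symm]
    · subst ht
      rw [hk, Bool.and_true, decide_eq_true (by omega : t < t + 1),
        decide_eq_true (rfl : t = t)]
    · rw [decide_eq_false (by omega : ¬(t < k + 1)), Bool.false_and,
        (decide_eq_false (by omega : ¬(k = t))).symm]
  have hblt : (2:Nat)^k < 2^(k+1) := pv_two_pow_lt k
  have hble : (2:Nat)^k - 1 < 2^(k+1) := by omega
  have hXeq : X = 2^(k+1) * a + 2^k := by rw [hXab, hb]
  have h2k : 1 ≤ (2:Nat)^k := Nat.one_le_two_pow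
  have hX1 : X - 1 = 2^(k+1) * a + (2^k - 1) := by omega
  have hjk1 : ¬(j < k + 1) := by omega
  have hXj : X.testBit j = a.testBit (j - (k+1)) := by
    rw [hXeq, Nat.testBit_two_pow_mul_add a hblt j, if_neg hjk1]
  have hX1j : (X - 1).testBit j = a.testBit (j - (k+1)) := by
    rw [hX1, Nat.testBit_two_pow_mul_add a hble j, if_neg hjk1]
  exact (pv_and_eq_zero_iff X (X - 1)).mp h j ⟨hj, by rw [hX1j, ← hXj]; exact hj⟩

-- `X &&& (X-1) = 0` iff X has at most one set bit.
theorem pv_onebit_iff (X : Nat) :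
    X &&& (X - 1) = 0 ↔ ∀ i j, X.testBit i = true → X.testBit j = true → i = j := by
  constructor
  · intro h i j hi hj
    rcases Nat.lt_trichotomy i j with hij | hij | hij
    · exact absurd (pv_onebit_aux X i j h hi hj hij) (fun f => f.elim)
    · exact hij
    · exact absurd (pv_onebit_aux X j i h hj hi hij) (fun f => f.elim)
  · intro h
    by_cases hX : X = 0
    · subst hX; simp
    · have hex : ∃ k, X.testBit k = true := by
        by_contra hc
        push Not at hc
        exact hX (Nat.eq_of_testBit_eq fun i => by
          rw [Nat.zero_testBit]
          exact Bool.eq_false_iff.mpr (hc i))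
      obtain ⟨k, hk⟩ := hex
      have hX2 : X = 2^k := by
        apply Nat.eq_of_testBit_eq
        intro t
        rw [Nat.testBit_two_pow]
        by_cases hkt : k = t
        · subst hkt; rw [hk]; simp
        · have : X.testBit t = false := by
            cases ht : X.testBit t with
            | false => rfl
            | true => exact absurd (h k t hk ht) hkt
          rw [this]
          simp [hkt]
      rw [hX2]
      apply (pv_and_eq_zero_iff _ _).mpr
      intro t ⟨h1, h2⟩
      rw [Nat.testBit_two_pow] at h1
      rw [Nat.testBit_two_pow_sub_one] at h2
      have e1 : k = t := by simpa using h1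
      have e2 : t < k := by simpa using h2
      omega

-- Int.land with a power of two isolates one bit.
theorem pv_land_pow (a : Int) (j : Nat) :
    Int.land a ((2:Int)^j) = if a.testBit j then ((2:Int)^j) else 0 := by
  have hcast : Int.ofNat (2^j) = ((2:Int)^j) := by
    rw [Int.ofNat_eq_natCast]
    push_cast
    ring
  cases a with
  | ofNat m =>
    rw [← hcast, pv_land_ofNat, pv_testBit_ofNat, Nat.and_two_pow]
    cases hm : m.testBit j with
    | false => simp
    | true => simp
  | negSucc m =>
    rw [← hcast, pv_land_negSucc, pv_testBit_negSucc]
    have hld : Nat.ldiff (2^j) m = if m.testBit j then 0 else 2^j := by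
      apply Nat.eq_of_testBit_eq
      intro t
      rw [Nat.testBit_ldiff, Nat.testBit_two_pow]
      by_cases hjt : j = t
      · subst hjt
        cases hm : m.testBit j <;> simp
      · cases hm : m.testBit j <;> simp [hjt]
    rw [hld]
    cases hm : m.testBit j with
    | false => simp
    | true => simp

-- A's branch condition at bit position j
theorem pv_cond_iff (nr1 nr2 : Int) (j : Nat) :
    (Int.land nr1 ((2:Int)^j) ≠ Int.land nr2 ((2:Int)^j)) ↔ nr1.testBit j ≠ nr2.testBit j := by
  have hpow : ((2:Int)^j) ≠ 0 := pow_ne_zero j two_ne_zero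
  rw [pv_land_pow, pv_land_pow]
  cases h1 : nr1.testBit j <;> cases h2 : nr2.testBit j <;> simp [hpow]
  · exact hpow.symm

theorem pv_shift_pow (j : Nat) : ((2:Int)^j) <<< (1 : Int) = (2:Int)^(j+1) := by
  have h := Int.shiftLeft_eq_mul_pow ((2:Int)^j) 1
  push_cast at h
  rw [h, pow_succ]

-- loop invariant: running A's loop for k steps starting at bit position j
theorem pv_loop_char (nr1 nr2 : Int) : ∀ (k j : Nat),
    (pvLoopA nr1 nr2 k ((2:Int)^j) 1 = true ↔
      ∀ i, i < k → nr1.testBit (j+i) = nr2.testBit (j+i)) ∧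
    (pvLoopA nr1 nr2 k ((2:Int)^j) 0 = true ↔
      ∀ i₁, i₁ < k → ∀ i₂, i₂ < k →
        nr1.testBit (j+i₁) ≠ nr2.testBit (j+i₁) →
        nr1.testBit (j+i₂) ≠ nr2.testBit (j+i₂) → i₁ = i₂) := by
  intro k
  induction k with
  | zero =>
    intro j
    constructor
    · simp [pvLoopA]
    · simp [pvLoopA]
  | succ k ih =>
    intro j
    have hc := pv_cond_iff nr1 nr2 j
    by_cases hD : nr1.testBit j ≠ nr2.testBit j
    · have hcond : Int.land nr1 ((2:Int)^j) ≠ Int.land nr2 ((2:Int)^j) := hc.mpr hD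
      constructor
      · -- diffs = 1 : second difference found, returns false
        rw [show pvLoopA nr1 nr2 (k+1) ((2:Int)^j) 1 = false by
          simp [pvLoopA, hcond]]
        constructor
        · intro h; exact absurd h (by simp)
        · intro h
          exact absurd (h 0 (Nat.succ_pos k)) (by simpa using hD)
      · -- diffs = 0 : first difference at j, continue with diffs = 1
        rw [show pvLoopA nr1 nr2 (k+1) ((2:Int)^j) 0
              = pvLoopA nr1 nr2 k ((2:Int)^(j+1)) 1 by
          simp [pvLoopA, hcond, pv_shift_pow]]
        rw [(ih (j+1)).1]
        constructor
        · intro h i₁ h1 i₂ h2 hd1 hd2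
          match i₁, i₂ with
          | 0, 0 => rfl
          | 0, s+1 =>
            exact absurd hd2 (by
              have := h s (by omega)
              rw [show j + (s+1) = j + 1 + s by omega]
              simpa using this)
          | s+1, _ =>
            exact absurd hd1 (by
              have := h s (by omega)
              rw [show j + (s+1) = j + 1 + s by omega]
              simpa using this)
        · intro h i hik
          cases hd : decide (nr1.testBit (j+1+i) ≠ nr2.testBit (j+1+i)) with
          | false => simpa using hd
          | true =>
            have hd' : nr1.testBit (j+1+i) ≠ nr2.testBit (j+1+i) := of_decide_eq_true hd
            have := h 0 (by omega) (i+1) (by omega) (by simpa using hD)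
              (by rw [show j + (i+1) = j + 1 + i by omega]; exact hd')
            omega
    · have heq : nr1.testBit j = nr2.testBit j := by
        by_contra hne
        exact hD hne
      have hcond : ¬(Int.land nr1 ((2:Int)^j) ≠ Int.land nr2 ((2:Int)^j)) := fun hx => hD (hc.mp hx)
      constructor
      · rw [show pvLoopA nr1 nr2 (k+1) ((2:Int)^j) 1
              = pvLoopA nr1 nr2 k ((2:Int)^(j+1)) 1 by
          simp [pvLoopA, hcond, pv_shift_pow]]
        rw [(ih (j+1)).1]
        constructor
        · intro h i hik
          match i with
          | 0 => simpa using heq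
          | s+1 =>
            have := h s (by omega)
            rw [show j + (s+1) = j + 1 + s by omega]
            exact this
        · intro h i hik
          have := h (i+1) (by omega)
          rw [show j + (i+1) = j + 1 + i by omega] at this
          exact this
      · rw [show pvLoopA nr1 nr2 (k+1) ((2:Int)^j) 0
              = pvLoopA nr1 nr2 k ((2:Int)^(j+1)) 0 by
          simp [pvLoopA, hcond, pv_shift_pow]]
        rw [(ih (j+1)).2]
        constructor
        · intro h i₁ h1 i₂ h2 hd1 hd2
          match i₁, i₂ with
          | 0, _ => exact absurd (by simpa using hd1) (by simp [heq])
          | _, 0 => exact absurd (by simpa using hd2) (by simp [heq])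
          | s+1, t+1 =>
            have := h s (by omega) t (by omega)
              (by rw [show j + 1 + s = j + (s+1) by omega]; exact hd1)
              (by rw [show j + 1 + t = j + (t+1) by omega]; exact hd2)
            omega
        · intro h s hs t ht hd1 hd2
          have := h (s+1) (by omega) (t+1) (by omega)
            (by rw [show j + (s+1) = j + 1 + s by omega]; exact hd1)
            (by rw [show j + (t+1) = j + 1 + t by omega]; exact hd2)
          omega

-- characterisation of A
theorem pv_A_char (nr1 nr2 : Int) (N : Nat) :
    (pvLoopA nr1 nr2 N 1 0 = true ↔
      ∀ i₁, i₁ < N → ∀ i₂, i₂ < N →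
        nr1.testBit i₁ ≠ nr2.testBit i₁ →
        nr1.testBit i₂ ≠ nr2.testBit i₂ → i₁ = i₂) := by
  have h := (pv_loop_char nr1 nr2 N 0).2
  rw [pow_zero] at h
  simpa using h

-- characterisation of B for n > 0
theorem pv_B_char (nr1 nr2 : Int) (n : Int) (hn : 0 < n) :
    (differOnlyByOneBit_alt nr1 nr2 n = true ↔
      ∀ i₁, i₁ < n.toNat → ∀ i₂, i₂ < n.toNat →
        nr1.testBit i₁ ≠ nr2.testBit i₁ →
        nr1.testBit i₂ ≠ nr2.testBit i₂ → i₁ = i₂) := by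
  set N := n.toNat with hN
  have hnN : n = (N:Int) := (Int.toNat_of_nonneg hn.le).symm
  have hmask : (1 : Int) <<< n - 1 = Int.ofNat (2^N - 1) := by
    rw [hnN, Int.one_shiftLeft, Int.ofNat_eq_natCast,
      Int.natCast_sub (Nat.one_le_two_pow)]
    push_cast
    ring
  rw [differOnlyByOneBit_alt, if_neg (not_le.mpr hn)]
  simp only [hmask]
  obtain ⟨Dn, hd, hbits⟩ : ∃ Dn : Nat,
      Int.land (Int.xor nr1 nr2) (Int.ofNat (2^N - 1)) = Int.ofNat Dn ∧
      ∀ t, Dn.testBit t = (decide (t < N) && (Int.xor nr1 nr2).testBit t) := by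
    cases hx : Int.xor nr1 nr2 with
    | ofNat m =>
      refine ⟨m &&& (2^N - 1), rfl, fun t => ?_⟩
      rw [Nat.testBit_and, Nat.testBit_two_pow_sub_one, pv_testBit_ofNat, Bool.and_comm]
    | negSucc m =>
      refine ⟨Nat.ldiff (2^N - 1) m, rfl, fun t => ?_⟩
      rw [Nat.testBit_ldiff, Nat.testBit_two_pow_sub_one, pv_testBit_negSucc]
  rw [hd]
  have hxorbit : ∀ t, (Int.xor nr1 nr2).testBit t = (nr1.testBit t ^^ nr2.testBit t) :=
    fun t => Int.testBit_lxor nr1 nr2 t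
  cases Dn with
  | zero =>
    have hld0 : Nat.ldiff 0 0 = 0 :=
      Nat.eq_of_testBit_eq (fun i => by rw [Nat.testBit_ldiff, Nat.zero_testBit]; simp)
    have hz : Int.land (Int.ofNat 0) (Int.ofNat 0 - 1) = 0 := by
      rw [show (Int.ofNat 0 - 1 : Int) = Int.negSucc 0 by decide, pv_land_ofNat_negSucc, hld0]
      rfl
    rw [hz]
    simp only [decide_eq_true_eq]
    constructor
    · intro _ i₁ h1 i₂ h2 hd1 hd2
      have hb := hbits i₁
      rw [Nat.zero_testBit, hxorbit] at hb
      have : (nr1.testBit i₁ ^^ nr2.testBit i₁) = true := (pv_bxor_iff _ _).mpr hd1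
      rw [this] at hb
      simp [h1] at hb
    · intro _; trivial
  | succ m =>
    have hsub : Int.ofNat (m+1) - 1 = Int.ofNat m := by
      rw [Int.ofNat_eq_natCast, Int.ofNat_eq_natCast]
      push_cast
      ring
    rw [hsub, pv_land_ofNat]
    have hone := pv_onebit_iff (m+1)
    have hm1 : (m+1) - 1 = m := rfl
    rw [hm1] at hone
    simp only [Int.ofNat_eq_natCast, Int.natCast_eq_zero, decide_eq_true_eq]
    rw [hone]
    constructor
    · intro h i₁ h1 i₂ h2 hd1 hd2
      apply h i₁ i₂
      · rw [hbits, hxorbit, (pv_bxor_iff _ _).mpr hd1]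
        simp [h1]
      · rw [hbits, hxorbit, (pv_bxor_iff _ _).mpr hd2]
        simp [h2]
    · intro h i₁ i₂ h1 h2
      rw [hbits, hxorbit] at h1 h2
      have hlt1 : i₁ < N := by
        by_contra hc
        simp [hc] at h1
      have hlt2 : i₂ < N := by
        by_contra hc
        simp [hc] at h2
      refine h i₁ hlt1 i₂ hlt2 ?_ ?_
      · simp [hlt1] at h1
        exact h1
      · simp [hlt2] at h2
        exact h2

-- ===== VERDICT (by name: the statement is the Claim_ definition above) =====
theorem differOnlyByOneBit_spec : Claim_equal_differOnlyByOneBit := by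
  intro nr1 nr2 n _
  unfold Spec_differOnlyByOneBit
  by_cases hn : n ≤ 0
  · have h0 : n.toNat = 0 := Int.toNat_of_nonpos hn
    simp [differOnlyByOneBit, differOnlyByOneBit_alt, h0, hn, pvLoopA]
  · push Not at hn
    have hA := pv_A_char nr1 nr2 n.toNat
    have hB := pv_B_char nr1 nr2 n hn
    have hAB : (differOnlyByOneBit nr1 nr2 n = true) ↔ (differOnlyByOneBit_alt nr1 nr2 n = true) := by
      rw [differOnlyByOneBit]
      exact hA.trans hB.symm
    cases hA' : differOnlyByOneBit nr1 nr2 n <;> cases hB' : differOnlyByOneBit_alt nr1 nr2 n <;>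
      simp_all
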